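-- pv_equiv track=rewrite | github.com/bioinfoUQAM/siWalk | src/parse_alignment_of_a_contig.py | _internal_eff_coor
-- ===== SOURCE A (Python) =====
-- def _internal_eff_coor (d, pos, f):
--   ''' allow phase drift
--   @d: Watson or Crick pos:freq; due to my code design, need to process Watson and Crick separately
--   @p: position of the most abundant freq in d
--   @q: freq at p in d
--   '''
--   dres, p, q = {}, 0, 0
--   for i in range(pos - f, pos + f + 1):
--     if i in d.keys(): dres[i] = d[i]
--   if len(dres.keys()) > 0:
--     p = max(dres, key=dres.get)
--     q = dres[p]
--   return p, q
-- ===== SOURCE B (Python) =====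
-- def _internal_eff_coor(d, pos, f):
--     ''' allow phase drift: single ascending scan over the window, no intermediate dict '''
--     p, q, found = 0, 0, False
--     for i in range(pos - f, pos + f + 1):
--         if i in d:
--             v = d[i]
--             if not found or v > q:
--                 p, q, found = i, v, True
--     return p, q
-- ===== Notes on version B (the rewrite author's own statement) =====
-- stated objective: simpler
-- what changed: Drops the intermediate dres dict and the separate max() pass: one ascending scan over the window keeps the running best (first hit, then strict >), which reproduces max's first-key tie rule.
import Mathlib
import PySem

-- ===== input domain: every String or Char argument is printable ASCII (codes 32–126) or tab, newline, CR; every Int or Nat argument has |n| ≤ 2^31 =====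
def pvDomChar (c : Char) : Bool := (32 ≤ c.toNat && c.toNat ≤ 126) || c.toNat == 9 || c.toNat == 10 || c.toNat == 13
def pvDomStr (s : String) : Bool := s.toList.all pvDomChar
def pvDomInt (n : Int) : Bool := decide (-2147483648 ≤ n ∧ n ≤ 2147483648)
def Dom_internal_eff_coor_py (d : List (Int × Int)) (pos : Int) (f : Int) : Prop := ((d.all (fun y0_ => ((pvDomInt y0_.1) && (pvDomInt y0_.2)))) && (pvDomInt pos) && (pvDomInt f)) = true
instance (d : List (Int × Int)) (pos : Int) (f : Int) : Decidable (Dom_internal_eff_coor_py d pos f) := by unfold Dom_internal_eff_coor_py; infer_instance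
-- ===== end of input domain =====

-- B replaces A's intermediate dict + separate max() pass by one ascending scan keeping the running best (objective: simpler).

-- ===== PORT A =====
def internal_eff_coor_py (d : List (Int × Int)) (pos : Int) (f : Int) : Int × Int :=
  let dres : PySem.Dict Int Int :=
    (PySem.List.pyRange (pos - f) (pos + f + 1) 1).foldl
      (fun dres i =>
        match (PySem.Dict.mk d).get? i with
        | some v => dres.insert i v
        | none => dres) (PySem.Dict.mk [])
  if dres.keys.length > 0 then
    -- max(dres, key=dres.get): every key of dres is present, so dres.get k = dres.getD k 0 here
    match PySem.List.max? dres.keys (fun k => dres.getD k 0) with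
    | some p => (p, dres.getD p 0)   -- q = dres[p]; p is a key of dres, so getD is exact
    | none => (0, 0)                 -- unreachable: keys nonempty
  else (0, 0)

-- ===== PORT B =====
def internal_eff_coor_py_alt (d : List (Int × Int)) (pos : Int) (f : Int) : Int × Int :=
  let st : Bool × Int × Int :=
    (PySem.List.pyRange (pos - f) (pos + f + 1) 1).foldl
      (fun (st : Bool × Int × Int) i =>
        match (PySem.Dict.mk d).get? i with
        | some v => if !st.1 || decide (st.2.2 < v) then (true, i, v) else st
        | none => st) (false, 0, 0)
  (st.2.1, st.2.2)

-- ===== PRECONDITION & SPEC =====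
def Spec_internal_eff_coor_py (d : List (Int × Int)) (pos : Int) (f : Int) (out : Int × Int) : Prop := out = internal_eff_coor_py_alt d pos f
instance (d : List (Int × Int)) (pos : Int) (f : Int) (out : Int × Int) : Decidable (Spec_internal_eff_coor_py d pos f out) := by unfold Spec_internal_eff_coor_py; infer_instance

-- ===== CLAIM (what is proved, stated in full; the proofs are below) =====
def Claim_equal_internal_eff_coor_py : Prop := ∀ (d : List (Int × Int)) (pos : Int) (f : Int), Dom_internal_eff_coor_py d pos f → Spec_internal_eff_coor_py d pos f (internal_eff_coor_py d pos f)

-- ===== LEMMAS AND PROOFS =====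

-- proof-side helpers
def pvScanStep (st : Bool × Int × Int) (kv : Int × Int) : Bool × Int × Int :=
  if !st.1 || decide (st.2.2 < kv.2) then (true, kv.1, kv.2) else st

def pvScan (l : List (Int × Int)) : Bool × Int × Int := l.foldl pvScanStep (false, 0, 0)

def pvBest (t : List (Int × Int)) (pq : Int × Int) : Int × Int :=
  t.foldl (fun pq kv => if decide (pq.2 < kv.2) then (kv.1, kv.2) else pq) pq

lemma pv_find_first (l : List (Int × Int)) (kv : Int × Int)
    (hnd : (l.map Prod.fst).Nodup) (hm : kv ∈ l) :
    List.find? (fun p => p.1 == kv.1) l = some kv := by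
  induction l with
  | nil => cases hm
  | cons a t ih =>
    simp only [List.map_cons, List.nodup_cons] at hnd
    rcases List.mem_cons.mp hm with h | h
    · subst h; simp [List.find?]
    · have ha : ¬ ((fun p : Int × Int => p.1 == kv.1) a = true) := by
        simp only [beq_iff_eq]
        intro he; exact hnd.1 (he ▸ List.mem_map.mpr ⟨kv, h, rfl⟩)
      rw [List.find?_cons_of_neg (by simpa using ha)]
      exact ih hnd.2 h

lemma pv_getD_mem (l : List (Int × Int)) (kv : Int × Int)
    (hnd : (l.map Prod.fst).Nodup) (hm : kv ∈ l) :
    (PySem.Dict.mk l).getD kv.1 0 = kv.2 := by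
  simp [PySem.Dict.getD, PySem.Dict.get?, pv_find_first l kv hnd hm]

lemma pv_scan_found (t : List (Int × Int)) (p q : Int) :
    t.foldl pvScanStep (true, p, q) = (true, pvBest t (p, q)) := by
  induction t generalizing p q with
  | nil => rfl
  | cons kv t ih =>
    have hb : pvBest (kv :: t) (p, q)
        = pvBest t (if decide (q < kv.2) then (kv.1, kv.2) else (p, q)) := rfl
    by_cases h : q < kv.2
    · rw [List.foldl_cons,
        show pvScanStep (true, p, q) kv = (true, kv.1, kv.2) from by simp [pvScanStep, h],
        ih, hb]
      simp [h]
    · rw [List.foldl_cons,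
        show pvScanStep (true, p, q) kv = (true, p, q) from by simp [pvScanStep, h],
        ih, hb]
      simp [h]

lemma pv_max_scan (dd : PySem.Dict Int Int) (t : List (Int × Int)) (p q : Int)
    (ht : ∀ kv ∈ t, dd.getD kv.1 0 = kv.2) (hp : dd.getD p 0 = q) :
    PySem.List.max? (p :: t.map (fun x => x.1)) (fun k => dd.getD k 0)
      = some (pvBest t (p, q)).1
    ∧ dd.getD (pvBest t (p, q)).1 0 = (pvBest t (p, q)).2 := by
  induction t generalizing p q with
  | nil => exact ⟨rfl, hp⟩
  | cons kv t ih =>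
    have hkv : dd.getD kv.1 0 = kv.2 := ht kv (List.mem_cons_self ..)
    have ht' : ∀ kv' ∈ t, dd.getD kv'.1 0 = kv'.2 := fun kv' h => ht kv' (List.mem_cons_of_mem _ h)
    have hunf : PySem.List.max? (p :: kv.1 :: t.map (fun x => x.1)) (fun k => dd.getD k 0)
        = PySem.List.max? ((if dd.getD p 0 < dd.getD kv.1 0 then kv.1 else p)
            :: t.map (fun x => x.1)) (fun k => dd.getD k 0) := by
      simp only [PySem.List.max?, List.foldl_cons]
      congr 1
      by_cases h : dd.getD p 0 < dd.getD kv.1 0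
      · simp [h]
      · simp [h]
    rw [List.map_cons, hunf]
    by_cases h : q < kv.2
    · have hb : pvBest (kv :: t) (p, q) = pvBest t (kv.1, kv.2) := by
        rw [show pvBest (kv :: t) (p, q)
            = pvBest t (if decide (q < kv.2) then (kv.1, kv.2) else (p, q)) from rfl]
        simp [h]
      rw [hb, if_pos (by rw [hp, hkv]; exact h)]
      exact ih kv.1 kv.2 ht' hkv
    · have hb : pvBest (kv :: t) (p, q) = pvBest t (p, q) := by
        rw [show pvBest (kv :: t) (p, q)
            = pvBest t (if decide (q < kv.2) then (kv.1, kv.2) else (p, q)) from rfl]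
        simp [h]
      rw [hb, if_neg (by rw [hp, hkv]; exact h)]
      exact ih p q ht' hp

lemma pv_finish (dd : PySem.Dict Int Int)
    (hnd : (dd.items.map Prod.fst).Nodup) :
    (if dd.keys.length > 0 then
       match PySem.List.max? dd.keys (fun k => dd.getD k 0) with
       | some p => (p, dd.getD p 0)
       | none => ((0 : Int), (0 : Int))
     else (0, 0)) = ((pvScan dd.items).2.1, (pvScan dd.items).2.2) := by
  obtain ⟨l⟩ := dd
  cases l with
  | nil => rfl
  | cons kv t =>
    have hmem : ∀ kv' ∈ t, (PySem.Dict.mk (kv :: t)).getD kv'.1 0 = kv'.2 :=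
      fun kv' h => pv_getD_mem _ kv' hnd (List.mem_cons_of_mem _ h)
    have hhd : (PySem.Dict.mk (kv :: t)).getD kv.1 0 = kv.2 :=
      pv_getD_mem _ kv hnd (List.mem_cons_self ..)
    obtain ⟨hmax, hval⟩ := pv_max_scan (PySem.Dict.mk (kv :: t)) t kv.1 kv.2 hmem hhd
    have hscan : pvScan (kv :: t) = (true, pvBest t (kv.1, kv.2)) := by
      have h0 : pvScanStep (false, 0, 0) kv = (true, kv.1, kv.2) := by simp [pvScanStep]
      rw [pvScan, List.foldl_cons, h0]
      exact pv_scan_found t kv.1 kv.2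
    rw [if_pos (by simp [PySem.Dict.keys])]
    rw [show (PySem.Dict.mk (kv :: t)).keys = kv.1 :: t.map (fun x => x.1) from rfl]
    rw [hmax, hscan]
    simp [hval]

lemma pv_contains_false_iff (m : PySem.Dict Int Int) (i : Int) :
    m.contains i = false ↔ i ∉ m.items.map Prod.fst := by
  rw [PySem.Dict.contains, List.any_eq_false]
  constructor
  · intro h hmem
    obtain ⟨p, hp, he⟩ := List.mem_map.mp hmem
    exact absurd (by simp [he] : (fun p : Int × Int => p.1 == i) p = true) (h p hp)
  · intro h p hp
    simp only [beq_iff_eq]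
    intro he
    exact h (List.mem_map.mpr ⟨p, hp, he⟩)

lemma pv_fold (dd : PySem.Dict Int Int) (L : List Int) :
    ∀ (m : PySem.Dict Int Int), L.Nodup →
      (∀ i ∈ L, m.contains i = false) →
      (m.items.map Prod.fst).Nodup →
      ((L.foldl (fun m i =>
          match dd.get? i with
          | some v => m.insert i v
          | none => m) m).items.map Prod.fst).Nodup
      ∧ L.foldl (fun (st : Bool × Int × Int) i =>
          match dd.get? i with
          | some v => if !st.1 || decide (st.2.2 < v) then (true, i, v) else st
          | none => st) (pvScan m.items)
        = pvScan ((L.foldl (fun m i =>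
          match dd.get? i with
          | some v => m.insert i v
          | none => m) m).items) := by
  induction L with
  | nil => exact fun m _ _ hk => ⟨hk, rfl⟩
  | cons i t ih =>
    intro m hnd hc hk
    have hci : m.contains i = false := hc i (List.mem_cons_self ..)
    cases hdi : dd.get? i with
    | none =>
      simp only [List.foldl_cons, hdi]
      exact ih m hnd.of_cons (fun j hj => hc j (List.mem_cons_of_mem _ hj)) hk
    | some v =>
      have hins : m.insert i v = PySem.Dict.mk (m.items ++ [(i, v)]) := by
        simp [PySem.Dict.insert, hci]
      have hik : i ∉ m.items.map Prod.fst := (pv_contains_false_iff m i).mp hci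
      have hk' : (((PySem.Dict.mk (m.items ++ [(i, v)])).items).map Prod.fst).Nodup := by
        simp only [List.map_append, List.map_cons, List.map_nil]
        exact List.Nodup.append hk (List.nodup_singleton _)
          (by intro a ha hb; simp at hb; subst hb; exact hik ha)
      have hc' : ∀ j ∈ t, (PySem.Dict.mk (m.items ++ [(i, v)])).contains j = false := by
        intro j hj
        rw [pv_contains_false_iff]
        simp only [List.map_append, List.map_cons, List.map_nil, List.mem_append]
        rintro (h | h)
        · exact absurd h ((pv_contains_false_iff m j).mp (hc j (List.mem_cons_of_mem _ hj)))
        · simp at h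
          exact (List.nodup_cons.mp hnd).1 (h ▸ hj)
      have hstep : pvScanStep (pvScan m.items) (i, v) = pvScan (m.items ++ [(i, v)]) := by
        simp [pvScan, List.foldl_append]
      obtain ⟨h1, h2⟩ := ih (PySem.Dict.mk (m.items ++ [(i, v)])) hnd.of_cons hc' hk'
      simp only [List.foldl_cons, hdi, hins]
      refine ⟨h1, ?_⟩
      rw [← h2, ← hstep]
      rfl

lemma pv_pyRange_nodup (a b : Int) : (PySem.List.pyRange a b 1).Nodup := by
  rw [PySem.List.pyRange]
  simp only [if_neg one_ne_zero]
  exact List.Nodup.map (fun x y h => by omega) (List.nodup_range)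

-- ===== VERDICT (by name: the statement is the Claim_ definition above) =====
theorem internal_eff_coor_py_spec : Claim_equal_internal_eff_coor_py := by
  intro d pos f _
  show internal_eff_coor_py d pos f = internal_eff_coor_py_alt d pos f
  obtain ⟨hk, hf⟩ := pv_fold (PySem.Dict.mk d) (PySem.List.pyRange (pos - f) (pos + f + 1) 1)
    (PySem.Dict.mk []) (pv_pyRange_nodup _ _) (fun _ _ => rfl) (by simp)
  have h1 : internal_eff_coor_py d pos f
      = ((pvScan ((PySem.List.pyRange (pos - f) (pos + f + 1) 1).foldl (fun m i =>
          match (PySem.Dict.mk d).get? i with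
          | some v => m.insert i v
          | none => m) (PySem.Dict.mk [])).items).2.1,
         (pvScan ((PySem.List.pyRange (pos - f) (pos + f + 1) 1).foldl (fun m i =>
          match (PySem.Dict.mk d).get? i with
          | some v => m.insert i v
          | none => m) (PySem.Dict.mk [])).items).2.2) := pv_finish _ hk
  exact h1.trans (congrArg (fun st : Bool × Int × Int => (st.2.1, st.2.2)) hf).symm
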